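-- pv_equiv track=rewrite | github.com/Cyofanni/high-school-cs-class | algorithms_2/max_dq.py | max_dq
-- ===== SOURCE A (Python) =====
-- def max_dq(A, p, r):
--   if p == r:
--     return A[p]
--   if r - p == 1:
--     return max(A[p], A[r])
--   q = (p + r) // 2
--   mx_q = A[q]
--   mx_l = max_dq(A, p, q - 1)
--   mx_r = max_dq(A, q + 1, r)
--   res = mx_q
--   if mx_l > res:
--     res = mx_l
--   if mx_r > res:
--     res = mx_r
--   return res
-- ===== SOURCE B (Python) =====
-- def max_dq(A, p, r):
--     res = A[p]
--     for i in range(p + 1, r + 1):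
--         if A[i] > res:
--             res = A[i]
--     return res
-- ===== Notes on version B (the rewrite author's own statement) =====
-- stated objective: simpler
-- what changed: Replaces the midpoint divide-and-conquer recursion (recurse on both halves, merge three maxima) with a single left-to-right scan keeping a running maximum.
import Mathlib
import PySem

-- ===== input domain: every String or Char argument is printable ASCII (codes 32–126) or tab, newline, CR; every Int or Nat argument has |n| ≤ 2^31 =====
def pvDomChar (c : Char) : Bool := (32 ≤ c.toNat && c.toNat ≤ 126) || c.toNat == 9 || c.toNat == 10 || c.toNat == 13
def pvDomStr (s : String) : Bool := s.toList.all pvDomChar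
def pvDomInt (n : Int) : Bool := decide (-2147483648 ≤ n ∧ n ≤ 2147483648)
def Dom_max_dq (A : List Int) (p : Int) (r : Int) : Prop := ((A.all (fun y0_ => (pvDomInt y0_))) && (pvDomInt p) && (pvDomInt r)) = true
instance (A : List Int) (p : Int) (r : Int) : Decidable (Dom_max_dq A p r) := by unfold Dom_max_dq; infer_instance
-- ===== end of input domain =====

-- ===== PORT A =====
-- B replaces the midpoint divide-and-conquer with a single left-to-right scan keeping a running maximum (simpler, same O(n) cost).
def max_dq (A : List Int) (p : Int) (r : Int) : Int :=
  if p = r then PySem.List.pyGetD A p 0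
  else if r - p = 1 then max (PySem.List.pyGetD A p 0) (PySem.List.pyGetD A r 0)
  else if r < p then 0   -- totality guard only: here the Python recursion never terminates (RecursionError); excluded by Pre_
  else
    let q := PySem.Int.floordiv (p + r) 2
    let mx_q := PySem.List.pyGetD A q 0
    let mx_l := max_dq A p (q - 1)
    let mx_r := max_dq A (q + 1) r
    let res := mx_q
    let res := if mx_l > res then mx_l else res
    let res := if mx_r > res then mx_r else res
    res
termination_by (r - p).toNat
decreasing_by
  all_goals
    simp only [PySem.Int.floordiv_eq_ediv_of_pos (show (0:Int) < 2 by omega)]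
    omega

-- ===== PORT B =====
def max_dq_alt (A : List Int) (p : Int) (r : Int) : Int :=
  (PySem.List.pyRange (p + 1) (r + 1) 1).foldl
    (fun res i => if PySem.List.pyGetD A i 0 > res then PySem.List.pyGetD A i 0 else res)
    (PySem.List.pyGetD A p 0)

-- ===== PRECONDITION & SPEC =====
-- Pre_ is exactly where the Python A returns: p ≤ r (otherwise the recursion never terminates, RecursionError)
-- and every index in p..r is a valid Python index of A, i.e. -len(A) ≤ p and r < len(A) (otherwise IndexError).
def Pre_max_dq (A : List Int) (p : Int) (r : Int) : Prop :=
  p ≤ r ∧ -(A.length : Int) ≤ p ∧ r < (A.length : Int)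
instance (A : List Int) (p : Int) (r : Int) : Decidable (Pre_max_dq A p r) := by unfold Pre_max_dq; infer_instance
def pvWitness_max_dq : List Int × Int × Int := ([3, 1, 2], 0, 2)

def Spec_max_dq (A : List Int) (p : Int) (r : Int) (out : Int) : Prop := out = max_dq_alt A p r
instance (A : List Int) (p : Int) (r : Int) (out : Int) : Decidable (Spec_max_dq A p r out) := by unfold Spec_max_dq; infer_instance

-- ===== CLAIM (what is proved, stated in full; the proofs are below) =====
def Claim_equal_max_dq : Prop := ∀ (A : List Int) (p : Int) (r : Int), Dom_max_dq A p r → Pre_max_dq A p r → Spec_max_dq A p r (max_dq A p r)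

-- ===== LEMMAS AND PROOFS =====
-- g A i: the Int Python's A[i] denotes on valid indices
def gIdx (A : List Int) (i : Int) : Int := PySem.List.pyGetD A i 0

-- the body of B's scan, as a fold over an index list
def scanF (A : List Int) (a : Int) (l : List Int) : Int :=
  l.foldl (fun res i => if PySem.List.pyGetD A i 0 > res then PySem.List.pyGetD A i 0 else res) a

theorem max_dq_alt_eq_scanF (A : List Int) (p r : Int) :
    max_dq_alt A p r = scanF A (gIdx A p) (PySem.List.pyRange (p + 1) (r + 1) 1) := rfl

theorem scanF_eq_foldl_max (A : List Int) (l : List Int) (a : Int) :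
    scanF A a l = l.foldl (fun res i => max res (gIdx A i)) a := by
  induction l generalizing a with
  | nil => rfl
  | cons x xs ih =>
      simp only [scanF, List.foldl] at *
      rw [ih]
      congr 1
      unfold gIdx
      rcases le_or_gt (PySem.List.pyGetD A x 0) a with h | h
      · rw [if_neg (by omega), max_eq_left h]
      · rw [if_pos h, max_eq_right (le_of_lt h)]

theorem foldl_max_max (f : Int → Int) (l : List Int) :
    ∀ (a b : Int), l.foldl (fun res i => max res (f i)) (max a b) =
      max a (l.foldl (fun res i => max res (f i)) b) := by
  induction l with
  | nil => intro a b; rfl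
  | cons x xs ih =>
      intro a b
      simp only [List.foldl]
      rw [max_assoc, ih]

theorem scanF_append (A : List Int) (a : Int) (l1 l2 : List Int) :
    scanF A a (l1 ++ l2) = scanF A (scanF A a l1) l2 := by
  simp [scanF, List.foldl_append]

theorem scanF_cons_max (A : List Int) (a : Int) (x : Int) (l : List Int) :
    scanF A a (x :: l) = max a (scanF A (gIdx A x) l) := by
  rw [scanF_eq_foldl_max, scanF_eq_foldl_max]
  simp only [List.foldl]
  have : max a (gIdx A x) = max a (max (gIdx A x) (gIdx A x)) := by
    rw [max_self]
  rw [show (fun res i => max res (gIdx A i)) = (fun res i => max res (gIdx A i)) from rfl]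
  have h := foldl_max_max (gIdx A) l a (gIdx A x)
  calc l.foldl (fun res i => max res (gIdx A i)) (max a (gIdx A x))
      = max a (l.foldl (fun res i => max res (gIdx A i)) (gIdx A x)) := h

theorem max_dq_eq_alt (A : List Int) (p r : Int) (h : p ≤ r) :
    max_dq A p r = max_dq_alt A p r := by
  rw [max_dq_alt_eq_scanF]
  rw [max_dq]
  by_cases hpr : p = r
  · subst hpr
    rw [if_pos rfl, PySem.List.pyRange_one_eq_nil (by omega)]
    rfl
  · rw [if_neg hpr]
    by_cases h1 : r - p = 1
    · rw [if_pos h1]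
      have hr : r = p + 1 := by omega
      subst hr
      rw [show p + 1 + 1 = (p + 1) + 1 from rfl, PySem.List.pyRange_one_singleton]
      simp only [scanF, List.foldl, gIdx]
      rcases le_or_gt (PySem.List.pyGetD A (p+1) 0) (PySem.List.pyGetD A p 0) with hc | hc
      · rw [if_neg (by omega), max_eq_left hc]
      · rw [if_pos hc, max_eq_right (le_of_lt hc)]
    · rw [if_neg h1, if_neg (by omega)]
      simp only []
      set q := PySem.Int.floordiv (p + r) 2 with hq
      have hqb : p + 1 ≤ q ∧ q ≤ r - 1 := by
        rw [hq, PySem.Int.floordiv_eq_ediv_of_pos (show (0:Int) < 2 by omega)]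
        omega
      have ihl : max_dq A p (q - 1) = scanF A (gIdx A p) (PySem.List.pyRange (p + 1) (q - 1 + 1) 1) := by
        rw [max_dq_eq_alt A p (q - 1) (by omega), max_dq_alt_eq_scanF]
      have ihr : max_dq A (q + 1) r = scanF A (gIdx A (q + 1)) (PySem.List.pyRange (q + 1 + 1) (r + 1) 1) := by
        rw [max_dq_eq_alt A (q + 1) r (by omega), max_dq_alt_eq_scanF]
      -- split the scan's index range at q and q+1
      rw [PySem.List.pyRange_one_append (p + 1) q (r + 1) (by omega) (by omega)]
      rw [show PySem.List.pyRange q (r + 1) 1 = q :: PySem.List.pyRange (q + 1) (r + 1) 1 from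
            PySem.List.pyRange_one_cons (by omega)]
      rw [PySem.List.pyRange_one_cons (show q + 1 < r + 1 by omega)]
      rw [scanF_append]
      rw [scanF_cons_max]
      rw [scanF_cons_max]
      rw [show q - 1 + 1 = q by omega] at ihl
      rw [← ihl, ← ihr]
      -- both sides are the same three-way maximum of mx_q := g q, mx_l, mx_r
      set mq := gIdx A q
      set ml := max_dq A p (q - 1)
      set mr := max_dq A (q + 1) r
      show (if mr > (if ml > mq then ml else mq) then mr else (if ml > mq then ml else mq)) =
        max ml (max mq mr)
      simp only [max_def]
      split_ifs <;> omega
termination_by (r - p).toNat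
decreasing_by
  all_goals
    rw [hq, PySem.Int.floordiv_eq_ediv_of_pos (show (0:Int) < 2 by omega)] at *
    omega

-- ===== VERDICT (by name: the statement is the Claim_ definition above) =====
theorem max_dq_spec : Claim_equal_max_dq := by
  intro A p r _ hpre
  unfold Spec_max_dq
  exact max_dq_eq_alt A p r hpre.1
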